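-- pv_equiv track=rewrite | github.com/thalium/icebox | third_party/libdwarf/libdwarf-20190110/tsearch/scripts/concatlines.py | findfinal
-- ===== SOURCE A (Python) =====
-- def extractnum(w):
--   r = ""
--   dot="n"
--   for c in w:
--     if c.isdigit():
--        r = r + c
--        continue
--     if c == '.':
--        dot = "y"
--        r = r + c
--        continue
--     return r,dot
--   return r,dot
--
-- def istime(w):
--   """ Return "y" if the number looks like a time: d*.d*  """
--   t,d = extractnum(w)
--   if len(t) < 4:
--     return "n"
--   if  d == "n":
--     return "n"
--   if w[0].isdigit():
--     if w[1].isdigit: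
--       return "y"
--     elif w[1] == '.':
--       return "y"
--   return "n"
--
-- def findfinal(d):
--   beforenums = "y"
--   wds = d.split()
--   o= ""
--   o2 = ""
--   for w in wds:
--     if istime(w) == "y":
--       beforenums = "n"
--     if beforenums == "y":
--       o += " "
--       o += w
--       continue
--     else:
--       if w.endswith("user"):
--           t = ""
--           for c in w:
--              if not c == "u":
--                t += c
--              else:
--                o2 += " "
--                o2 += t
--       elif w.endswith("maxresident)k"):
--           t = ""
--           for c in w:
--              if not c == "m":
--                t += c
--              else:
--                o2 += " "
--                o2 += t
--       else:
--           ign = ""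
--   return (o,o2)
-- ===== SOURCE B (Python) =====
-- def _numprefix(w):
--     p = ""
--     for c in w:
--         if not (c.isdigit() or c == '.'):
--             break
--         p += c
--     return p
--
-- def _istime(w):
--     p = _numprefix(w)
--     return len(p) >= 4 and '.' in p and w[0].isdigit()
--
-- def _pieces(segs, out):
--     acc = ""
--     for s in segs[:-1]:
--         acc += s
--         out.append(" " + acc)
--
-- def findfinal(d):
--     wds = d.split()
--     k = next((j for j, w in enumerate(wds) if _istime(w)), len(wds))
--     o = "".join(" " + w for w in wds[:k])
--     o2 = []
--     for w in wds[k:]: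
--         if w.endswith("user"):
--             _pieces(w.split("u"), o2)
--         elif w.endswith("maxresident)k"):
--             _pieces(w.split("m"), o2)
--     return (o, "".join(o2))
-- ===== Notes on version B (the rewrite author's own statement) =====
-- stated objective: simpler
-- what changed: Replaces the stateful beforenums flag-scan with an index-first two-phase structure (find first time-word index, join the prefix, then a suffix pass), and replaces the cumulative char-flush inner loops by str.split on the marker character with a cumulative join over the segments.
import Mathlib
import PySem

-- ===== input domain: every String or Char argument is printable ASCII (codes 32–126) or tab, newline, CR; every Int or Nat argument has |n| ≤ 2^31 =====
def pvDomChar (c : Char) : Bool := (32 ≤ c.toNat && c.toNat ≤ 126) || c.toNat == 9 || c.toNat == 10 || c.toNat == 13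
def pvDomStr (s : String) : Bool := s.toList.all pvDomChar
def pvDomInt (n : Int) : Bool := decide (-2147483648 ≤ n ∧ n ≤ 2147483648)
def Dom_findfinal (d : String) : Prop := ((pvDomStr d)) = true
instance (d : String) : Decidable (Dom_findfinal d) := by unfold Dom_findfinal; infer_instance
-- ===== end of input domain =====

-- B replaces A's stateful flag-scan by an index-first two-phase pass (find the first time-word,
-- join the prefix, then handle suffixes via str.split) — objective: simpler. Return value only; no mutation.

-- ===== PORT A =====
def pvExtractnumA (cs : List Char) (r : List Char) (dot : String) : List Char × String :=
  match cs with
  | [] => (r, dot)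
  | c :: rest =>
    if PySem.Chars.isdigit c then pvExtractnumA rest (r ++ [c]) dot
    else if c = '.' then pvExtractnumA rest (r ++ [c]) "y"
    else (r, dot)

def pvIstimeA (w : List Char) : String :=
  let td := pvExtractnumA w [] "n"
  if td.1.length < 4 then "n"
  else if td.2 == "n" then "n"
  else
    -- w[0]/w[1] are in range whenever this point is reached (td.1 is a prefix of w of length ≥ 4),
    -- so the `none` arms are unreachable; Python's `w[1].isdigit` is a method reference (always truthy).
    match PySem.List.pyGet? w 0, PySem.List.pyGet? w 1 with
    | some c0, some _ => if PySem.Chars.isdigit c0 then "y" else "n"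
    | _, _ => "n"

def pvSuffLoopA (m : Char) (cs : List Char) (t : List Char) (o2 : List Char) : List Char :=
  match cs with
  | [] => o2
  | c :: rest =>
    if ¬ (c = m) then pvSuffLoopA m rest (t ++ [c]) o2
    else pvSuffLoopA m rest t (o2 ++ [' '] ++ t)

def pvLoopA (ws : List (List Char)) (b : String) (o : List Char) (o2 : List Char) :
    List Char × List Char :=
  match ws with
  | [] => (o, o2)
  | w :: rest =>
    let b' := if pvIstimeA w == "y" then "n" else b
    if b' == "y" then pvLoopA rest b' (o ++ [' '] ++ w) o2
    else if PySem.Chars.endswith w "user".toList then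
      pvLoopA rest b' o (pvSuffLoopA 'u' w [] o2)
    else if PySem.Chars.endswith w "maxresident)k".toList then
      pvLoopA rest b' o (pvSuffLoopA 'm' w [] o2)
    else pvLoopA rest b' o o2

def findfinal (d : String) : String × String :=
  let wds := PySem.Chars.split₀ d.toList
  let r := pvLoopA wds "y" [] []
  (String.ofList r.1, String.ofList r.2)

-- ===== PORT B =====
def pvNumprefixB (cs : List Char) (p : List Char) : List Char :=
  match cs with
  | [] => p
  | c :: rest =>
    if ¬ (PySem.Chars.isdigit c || c == '.') then p
    else pvNumprefixB rest (p ++ [c])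

def pvIstimeB (w : List Char) : Bool :=
  let p := pvNumprefixB w []
  decide (4 ≤ p.length) && PySem.Chars.isIn ['.'] p &&
    (match PySem.List.pyGet? w 0 with
     | some c0 => PySem.Chars.isdigit c0
     | none => false)

def pvPiecesB (segs : List (List Char)) (out : List (List Char)) : List (List Char) :=
  (segs.dropLast.foldl (fun st s => (st.1 ++ s, st.2 ++ [' ' :: (st.1 ++ s)]))
    (([] : List Char), out)).2

def pvLoopB (ws : List (List Char)) (o2 : List (List Char)) : List (List Char) :=
  match ws with
  | [] => o2
  | w :: rest =>
    if PySem.Chars.endswith w "user".toList then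
      pvLoopB rest (pvPiecesB (PySem.Chars.splitOn w ['u']) o2)
    else if PySem.Chars.endswith w "maxresident)k".toList then
      pvLoopB rest (pvPiecesB (PySem.Chars.splitOn w ['m']) o2)
    else pvLoopB rest o2

def findfinal_alt (d : String) : String × String :=
  let wds := PySem.Chars.split₀ d.toList
  let k := wds.findIdx pvIstimeB
  let o := ((wds.take k).map (fun w => ' ' :: w)).flatten
  let o2 := (pvLoopB (wds.drop k) []).flatten
  (String.ofList o, String.ofList o2)

-- ===== PRECONDITION & SPEC =====
def Spec_findfinal (d : String) (out : String × String) : Prop := out = findfinal_alt d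
instance (d : String) (out : String × String) : Decidable (Spec_findfinal d out) := by
  unfold Spec_findfinal; infer_instance

-- ===== CLAIM (what is proved, stated in full; the proofs are below) =====
def Claim_equal_findfinal : Prop := ∀ (d : String), Dom_findfinal d → Spec_findfinal d (findfinal d)

-- ===== LEMMAS AND PROOFS =====
def pvQ (c : Char) : Bool := PySem.Chars.isdigit c || c == '.'

lemma pvExtractnumA_eq (cs : List Char) : ∀ (r : List Char) (dot : String),
    pvExtractnumA cs r dot =
      (r ++ cs.takeWhile pvQ, if '.' ∈ cs.takeWhile pvQ then "y" else dot) := by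
  induction cs with
  | nil => intro r dot; simp [pvExtractnumA]
  | cons c rest ih =>
    intro r dot
    by_cases hd : PySem.Chars.isdigit c
    · have hne : c ≠ '.' := by
        intro h; subst h; simp [PySem.Chars.isdigit] at hd
      simp [pvExtractnumA, hd, pvQ, ih, Ne.symm hne]
    · by_cases hp : c = '.'
      · subst hp
        simp [pvExtractnumA, hd, pvQ, ih]
      · simp [pvExtractnumA, hd, hp, pvQ]

lemma pvNumprefixB_eq (cs : List Char) : ∀ (p : List Char),
    pvNumprefixB cs p = p ++ cs.takeWhile pvQ := by
  induction cs with
  | nil => intro p; simp [pvNumprefixB]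
  | cons c rest ih =>
    intro p
    simp only [pvNumprefixB]
    rcases hq : (PySem.Chars.isdigit c || c == '.') with _ | _
    · simp [hq, pvQ]
    · simp [hq, pvQ, ih]

lemma pvIstime_eq (w : List Char) : (pvIstimeA w == "y") = pvIstimeB w := by
  unfold pvIstimeA pvIstimeB
  rw [pvExtractnumA_eq, pvNumprefixB_eq]
  simp only [List.nil_append]
  by_cases h4 : (w.takeWhile pvQ).length < 4
  · simp [h4]
  · have hwlen : 4 ≤ w.length :=
      le_trans (by omega) (List.IsPrefix.length_le (List.takeWhile_prefix pvQ))
    obtain ⟨c0, w1, rfl⟩ : ∃ c0 w1, w = c0 :: w1 := by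
      cases w with
      | nil => simp at hwlen
      | cons a b => exact ⟨a, b, rfl⟩
    obtain ⟨c1, w2, rfl⟩ : ∃ c1 w2, w1 = c1 :: w2 := by
      cases w1 with
      | nil => simp at hwlen
      | cons a b => exact ⟨a, b, rfl⟩
    have hg0 : PySem.List.pyGet? (c0 :: c1 :: w2) (0 : Int) = some c0 := by
      rw [show (0 : Int) = ((0 : Nat) : Int) from rfl, PySem.List.pyGet?_natCast]; rfl
    by_cases hdot : '.' ∈ (c0 :: c1 :: w2).takeWhile pvQ
    · have hin : PySem.Chars.isIn ['.'] ((c0 :: c1 :: w2).takeWhile pvQ) = true :=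
        (PySem.Chars.isIn_iff_infix _ _).2 ((List.singleton_infix_iff _ _).2 hdot)
    -- A's inner test 'w[1].isdigit' is a truthy method reference: result is "y" iff w[0] is a digit
      by_cases hc0 : PySem.Chars.isdigit c0 = true
      · simp [h4, hdot, hg0, hin, hc0]
        omega
      · simp [h4, hdot, hg0, hin, hc0]
    · have hin : PySem.Chars.isIn ['.'] ((c0 :: c1 :: w2).takeWhile pvQ) = false := by
        rcases h : PySem.Chars.isIn ['.'] ((c0 :: c1 :: w2).takeWhile pvQ) with _ | _
        · rfl
        · exact absurd ((List.singleton_infix_iff _ _).1 ((PySem.Chars.isIn_iff_infix _ _).1 h)) hdot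
      simp [h4, hdot, hin]

-- characterisation of PySem.Chars.splitOn with a one-char separator
def pvSegs (m : Char) : List Char → List Char → List (List Char)
  | [], cur => [cur.reverse]
  | c :: rest, cur => if c = m then cur.reverse :: pvSegs m rest [] else pvSegs m rest (c :: cur)

lemma pvSegs_ne_nil (m : Char) (cs cur : List Char) : pvSegs m cs cur ≠ [] := by
  induction cs generalizing cur with
  | nil => simp [pvSegs]
  | cons c rest ih => by_cases h : c = m <;> simp [pvSegs, h, ih]

lemma pvSplitOn_go_singleton (m : Char) : ∀ (fuel : Nat) (l cur : List Char)
    (acc : List (List Char)), l.length < fuel →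
    PySem.Chars.splitOn.go [m] fuel l cur acc = acc.reverse ++ pvSegs m l cur := by
  intro fuel
  induction fuel with
  | zero => intro l cur acc h; omega
  | succ n ih =>
    intro l cur acc h
    cases l with
    | nil => simp [PySem.Chars.splitOn.go, pvSegs]
    | cons c rest =>
      by_cases hc : c = m
      · subst hc
        have hstep : PySem.Chars.splitOn.go [c] (n + 1) (c :: rest) cur acc =
            PySem.Chars.splitOn.go [c] n rest [] (cur.reverse :: acc) := by
          simp [PySem.Chars.splitOn.go, List.isPrefixOf]
        rw [hstep, ih rest [] (cur.reverse :: acc) (by simp at h; omega)]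
        simp [pvSegs]
      · have hstep : PySem.Chars.splitOn.go [m] (n + 1) (c :: rest) cur acc =
            PySem.Chars.splitOn.go [m] n rest (c :: cur) acc := by
          simp [PySem.Chars.splitOn.go, List.isPrefixOf, Ne.symm hc]
        rw [hstep, ih rest (c :: cur) acc (by simp at h; omega)]
        simp [pvSegs, hc]

lemma pvSplitOn_singleton (m : Char) (l : List Char) :
    PySem.Chars.splitOn l [m] = pvSegs m l [] := by
  have := pvSplitOn_go_singleton m (l.length + 1) l [] [] (by omega)
  simpa [PySem.Chars.splitOn] using this

-- the flushed pieces A's inner char loop appends to o2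
def pvSuffOut (m : Char) : List Char → List Char → List Char
  | [], _ => []
  | c :: rest, t => if c = m then (' ' :: t) ++ pvSuffOut m rest t else pvSuffOut m rest (t ++ [c])

lemma pvSuffLoopA_eq (m : Char) (cs : List Char) : ∀ (t o2 : List Char),
    pvSuffLoopA m cs t o2 = o2 ++ pvSuffOut m cs t := by
  induction cs with
  | nil => intro t o2; simp [pvSuffLoopA, pvSuffOut]
  | cons c rest ih =>
    intro t o2
    by_cases h : c = m <;> simp [pvSuffLoopA, pvSuffOut, h, ih]

def pvPieceOut : List (List Char) → List Char → List (List Char)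
  | [], _ => []
  | [_], _ => []
  | s :: s' :: rest, acc => (' ' :: (acc ++ s)) :: pvPieceOut (s' :: rest) (acc ++ s)

lemma pvFold_eq (segs : List (List Char)) : ∀ (acc : List Char) (out : List (List Char)),
    ((segs.dropLast).foldl (fun st s => (st.1 ++ s, st.2 ++ [' ' :: (st.1 ++ s)]))
      (acc, out)).2 = out ++ pvPieceOut segs acc := by
  induction segs with
  | nil => intro acc out; simp [pvPieceOut]
  | cons s rest ih =>
    intro acc out
    cases rest with
    | nil => simp [pvPieceOut]
    | cons s' rest' =>
      have hun : pvPieceOut (s :: s' :: rest') acc =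
          (' ' :: (acc ++ s)) :: pvPieceOut (s' :: rest') (acc ++ s) := rfl
      rw [List.dropLast_cons₂, List.foldl_cons, hun]
      simp only []
      rw [ih (acc ++ s) (out ++ [' ' :: (acc ++ s)])]
      simp

lemma pvPiecesB_eq (segs : List (List Char)) (out : List (List Char)) :
    pvPiecesB segs out = out ++ pvPieceOut segs [] := by
  unfold pvPiecesB
  exact pvFold_eq segs [] out

lemma pvKey (m : Char) (cs : List Char) : ∀ (cur t : List Char),
    pvSuffOut m cs (t ++ cur.reverse) = (pvPieceOut (pvSegs m cs cur) t).flatten := by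
  induction cs with
  | nil => intro cur t; simp [pvSuffOut, pvSegs, pvPieceOut]
  | cons c rest ih =>
    intro cur t
    by_cases h : c = m
    · subst h
      rcases hs : pvSegs c rest [] with _ | ⟨s, ss⟩
      · exact absurd hs (pvSegs_ne_nil c rest [])
      · simp only [pvSuffOut, pvSegs, hs]
        have hthis := ih [] (t ++ cur.reverse)
        simp only [List.reverse_nil, List.append_nil, hs] at hthis
        have hunf : pvPieceOut (cur.reverse :: s :: ss) t =
            (' ' :: (t ++ cur.reverse)) :: pvPieceOut (s :: ss) (t ++ cur.reverse) := rfl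
        simp [hunf, hthis]
    · simp only [pvSuffOut, pvSegs, if_neg h]
      have := ih (c :: cur) t
      simpa using this

def pvWordOut (w : List Char) : List Char :=
  if PySem.Chars.endswith w "user".toList then pvSuffOut 'u' w []
  else if PySem.Chars.endswith w "maxresident)k".toList then pvSuffOut 'm' w []
  else []

lemma pvLoopA_n (ws : List (List Char)) : ∀ (o o2 : List Char),
    pvLoopA ws "n" o o2 = (o, o2 ++ (ws.map pvWordOut).flatten) := by
  induction ws with
  | nil => intro o o2; simp [pvLoopA]
  | cons w rest ih =>
    intro o o2
    simp only [pvLoopA, ite_self]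
    rw [if_neg (by decide)]
    simp only [pvSuffLoopA_eq, ih, List.map_cons, List.flatten_cons]
    split_ifs with e1 e2
    · simp only [pvWordOut]
      rw [if_pos e1]
      simp
    · simp only [pvWordOut]
      rw [if_neg e1, if_pos e2]
      simp
    · simp only [pvWordOut]
      rw [if_neg e1, if_neg e2]
      simp

lemma pvSuffOut_eq_pieces (m : Char) (w : List Char) :
    (pvPieceOut (PySem.Chars.splitOn w [m]) []).flatten = pvSuffOut m w [] := by
  rw [pvSplitOn_singleton]
  have := pvKey m w [] []
  simpa using this.symm

lemma pvLoopB_eq (ws : List (List Char)) : ∀ (out : List (List Char)),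
    (pvLoopB ws out).flatten = out.flatten ++ (ws.map pvWordOut).flatten := by
  induction ws with
  | nil => intro out; simp [pvLoopB]
  | cons w rest ih =>
    intro out
    simp only [pvLoopB, List.map_cons, List.flatten_cons]
    split_ifs with e1 e2
    · rw [ih, pvPiecesB_eq, List.flatten_append, pvSuffOut_eq_pieces]
      simp only [pvWordOut]
      rw [if_pos e1]
      simp
    · rw [ih, pvPiecesB_eq, List.flatten_append, pvSuffOut_eq_pieces]
      simp only [pvWordOut]
      rw [if_neg e1, if_pos e2]
      simp
    · rw [ih]
      simp only [pvWordOut]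
      rw [if_neg e1, if_neg e2]
      simp

lemma pvLoopA_y (ws : List (List Char)) : ∀ (o o2 : List Char),
    pvLoopA ws "y" o o2 =
      (o ++ (((ws.take (ws.findIdx pvIstimeB)).map (fun w => ' ' :: w)).flatten),
       o2 ++ ((ws.drop (ws.findIdx pvIstimeB)).map pvWordOut).flatten) := by
  induction ws with
  | nil => intro o o2; simp [pvLoopA]
  | cons w rest ih =>
    intro o o2
    rcases hb : pvIstimeB w with _ | _
    · have hA : (pvIstimeA w == "y") = false := by rw [pvIstime_eq, hb]
      simp only [pvLoopA, List.findIdx_cons, hb, cond_false]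
      rw [hA, if_neg Bool.false_ne_true, if_pos (by decide)]
      rw [ih]
      simp [List.take_succ_cons, List.drop_succ_cons, List.append_assoc]
    · have hA : (pvIstimeA w == "y") = true := by rw [pvIstime_eq, hb]
      simp only [pvLoopA, List.findIdx_cons, hb, cond_true, List.take_zero, List.drop_zero,
        List.map_nil, List.flatten_nil, List.append_nil, List.map_cons, List.flatten_cons]
      rw [hA, if_pos rfl, if_neg (by decide)]
      simp only [pvSuffLoopA_eq, pvLoopA_n, pvWordOut]
      split_ifs <;> simp

-- ===== VERDICT (by name: the statement is the Claim_ definition above) =====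
theorem findfinal_spec : Claim_equal_findfinal := by
  intro d _
  show findfinal d = findfinal_alt d
  simp only [findfinal, findfinal_alt]
  rw [pvLoopA_y]
  have h2 := pvLoopB_eq ((PySem.Chars.split₀ d.toList).drop
    ((PySem.Chars.split₀ d.toList).findIdx pvIstimeB)) []
  simp only [List.flatten_nil, List.nil_append] at h2
  rw [h2]
  simp
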